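-- pv_equiv track=rewrite | github.com/AbdullaK123/nexus-writer-backend | app/middleware/http_logging.py | _redact_query_string
-- ===== SOURCE A (Python) =====
-- SENSITIVE_FIELDS = {"password", "password_hash"}
--
-- def _redact_query_string(qs: str) -> str:
--     # very light redaction for query parameters containing sensitive keys
--     if not qs:
--         return qs
--     parts = qs.split("&")
--     redacted = []
--     for p in parts:
--         if "=" in p:
--             k, v = p.split("=", 1)
--             if k.lower() in SENSITIVE_FIELDS:
--                 redacted.append(f"{k}=<redacted>")
--             else:
--                 redacted.append(p)
--         else:
--             redacted.append(p)
--     return "&".join(redacted)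
-- ===== SOURCE B (Python) =====
-- SENSITIVE_FIELDS = {"password", "password_hash"}
--
--
-- def _fix(seg: str) -> str:
--     key, sep, _ = seg.partition("=")
--     if sep and key.lower() in SENSITIVE_FIELDS:
--         return key + "=<redacted>"
--     return seg
--
--
-- def _redact_query_string(qs: str) -> str:
--     # single left-to-right character scan: emit each '&'-delimited segment
--     # (redacted via partition) as soon as its end is seen
--     out = []
--     seg = []
--     for ch in qs:
--         if ch == "&":
--             out.append(_fix("".join(seg)))
--             out.append("&")
--             seg = []
--         else:
--             seg.append(ch)
--     out.append(_fix("".join(seg)))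
--     return "".join(out)
-- ===== Notes on version B (the rewrite author's own statement) =====
-- stated objective: alternative
-- what changed: replaces the split / per-part loop / join pipeline with a single character scan that builds each segment and emits it (redacted via str.partition) as soon as its terminator is seen
import Mathlib
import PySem

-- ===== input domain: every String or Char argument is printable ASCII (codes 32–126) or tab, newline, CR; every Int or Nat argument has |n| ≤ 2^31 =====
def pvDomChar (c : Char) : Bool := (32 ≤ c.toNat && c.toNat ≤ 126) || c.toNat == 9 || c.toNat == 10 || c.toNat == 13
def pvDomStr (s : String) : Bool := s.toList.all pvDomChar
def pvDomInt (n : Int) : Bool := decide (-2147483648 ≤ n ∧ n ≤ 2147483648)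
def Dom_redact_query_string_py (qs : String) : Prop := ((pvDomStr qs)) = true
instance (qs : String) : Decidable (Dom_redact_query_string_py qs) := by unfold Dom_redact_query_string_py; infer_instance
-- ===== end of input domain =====

-- B replaces A's split('&') / per-part loop / '&'.join with a single character scan
-- that emits each segment (redacted via partition) as its end is seen — alternative, same cost.


-- ===== PORT A =====
-- SENSITIVE_FIELDS = {"password", "password_hash"}
def pvSensitiveA : PySem.Set String := PySem.Set.ofList ["password", "password_hash"]

-- body of A's per-part branch: '=' in p; k, v = p.split('=', 1); k.lower() in SENSITIVE_FIELDS
def pvRedactPartA (p : List Char) : List Char :=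
  if PySem.Chars.isIn ['='] p then
    match PySem.Chars.splitOnMax p ['='] 1 with
    | [k, _v] =>
      if PySem.Set.contains pvSensitiveA (String.ofList (PySem.Chars.lower k)) then
        k ++ "=<redacted>".toList
      else p
    | _ => p   -- unreachable: split('=', 1) with '=' present yields exactly two pieces
  else p

def redact_query_string_py (qs : String) : String :=
  if qs.toList = [] then qs
  else
    let parts := PySem.Chars.splitOn qs.toList ['&']
    let redacted := parts.foldl (fun acc p => acc ++ [pvRedactPartA p]) []
    String.ofList (PySem.Chars.join ['&'] redacted)

-- ===== PORT B =====
-- SENSITIVE_FIELDS = {"password", "password_hash"} (Source B's own copy)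
def pvSensitiveB : PySem.Set String := PySem.Set.ofList ["password", "password_hash"]

-- _fix: key, sep, _ = seg.partition('='); partition ported by hand (exact):
-- key = chars before the first '='; sep is non-empty iff '=' occurs in seg
def pvFixB (seg : List Char) : List Char :=
  let key := seg.takeWhile (fun c => c ≠ '=')
  if seg.any (fun c => c = '=') &&
      PySem.Set.contains pvSensitiveB (String.ofList (PySem.Chars.lower key)) then
    key ++ "=<redacted>".toList
  else seg

-- one iteration of B's 'for ch in qs' loop over the state (out, seg)
def pvStepB (st : List (List Char) × List Char) (ch : Char) : List (List Char) × List Char :=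
  if ch = '&' then (st.1 ++ [pvFixB st.2] ++ [['&']], [])
  else (st.1, st.2 ++ [ch])

def redact_query_string_py_alt (qs : String) : String :=
  let st := qs.toList.foldl pvStepB ([], [])
  String.ofList (PySem.Chars.join [] (st.1 ++ [pvFixB st.2]))

-- ===== PRECONDITION & SPEC =====
def Spec_redact_query_string_py (qs : String) (out : String) : Prop := out = redact_query_string_py_alt qs
instance (qs : String) (out : String) : Decidable (Spec_redact_query_string_py qs out) := by unfold Spec_redact_query_string_py; infer_instance

-- ===== CLAIM (what is proved, stated in full; the proofs are below) =====
def Claim_equal_redact_query_string_py : Prop := ∀ (qs : String), Dom_redact_query_string_py qs → Spec_redact_query_string_py qs (redact_query_string_py qs)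

-- ===== LEMMAS AND PROOFS =====

-- simple recursive characterisation of qs.split('&')
def pvSplit : List Char → List (List Char)
  | [] => [[]]
  | c :: r => if c = '&' then [] :: pvSplit r
              else match pvSplit r with
                   | s :: ss => (c :: s) :: ss
                   | [] => [[c]]

lemma pvSplit_ne_nil (l : List Char) : pvSplit l ≠ [] := by
  cases l with
  | nil => simp [pvSplit]
  | cons c r =>
    simp only [pvSplit]
    split <;> [simp; (cases pvSplit r <;> simp)]

-- prepend a prefix onto the first piece
def pvConsHd (pre : List Char) : List (List Char) → List (List Char)
  | s :: ss => (pre ++ s) :: ss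
  | [] => [pre]

lemma pvSplitOn_go_eq (l : List Char) : ∀ (fuel : Nat) (cur : List Char) (acc : List (List Char)),
    l.length < fuel →
    PySem.Chars.splitOn.go ['&'] fuel l cur acc = acc.reverse ++ pvConsHd cur.reverse (pvSplit l) := by
  induction l with
  | nil =>
    intro fuel cur acc h
    cases fuel with
    | zero => omega
    | succ f => simp [PySem.Chars.splitOn.go, pvSplit, pvConsHd]
  | cons c r ih =>
    intro fuel cur acc h
    cases fuel with
    | zero => omega
    | succ f =>
      by_cases hc : c = '&'
      · subst hc
        rw [PySem.Chars.splitOn.go]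
        rw [if_pos (by simp [List.isPrefixOf])]
        simp only [List.length_cons, List.length_nil, List.drop_succ_cons, List.drop_zero,
          Nat.zero_add]
        rw [ih f [] (cur.reverse :: acc) (by simp at h ⊢; omega)]
        simp only [pvSplit, List.reverse_cons, List.reverse_nil]
        cases hps : pvSplit r with
        | nil => exact absurd hps (pvSplit_ne_nil r)
        | cons s ss => simp [pvConsHd]
      · rw [PySem.Chars.splitOn.go]
        rw [if_neg (by simp [List.isPrefixOf]; exact fun hh => hc hh.symm)]
        rw [ih f (c :: cur) acc (by simp at h ⊢; omega)]
        simp only [pvSplit, if_neg hc]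
        cases hps : pvSplit r with
        | nil => exact absurd hps (pvSplit_ne_nil r)
        | cons s ss => simp [pvConsHd]

lemma pvSplitOn_eq (l : List Char) : PySem.Chars.splitOn l ['&'] = pvSplit l := by
  rw [PySem.Chars.splitOn, pvSplitOn_go_eq l (l.length + 1) [] [] (by omega)]
  simp only [List.reverse_nil, List.nil_append]
  cases hps : pvSplit l with
  | nil => exact absurd hps (pvSplit_ne_nil l)
  | cons s ss => simp [pvConsHd]

-- split('=', 1) after the split count is exhausted: the rest is one piece
lemma pvGoMax_zero (fuel : Nat) (l cur : List Char) (acc : List (List Char)) :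
    PySem.Chars.splitOnMax.go ['='] fuel 0 l cur acc = ((cur.reverse ++ l) :: acc).reverse := by
  cases fuel with
  | zero => simp [PySem.Chars.splitOnMax.go]
  | succ f => cases l with
    | nil => simp [PySem.Chars.splitOnMax.go]
    | cons c r => simp [PySem.Chars.splitOnMax.go]

-- split('=', 1) when '=' occurs: [chars before the first '=', chars after it]
lemma pvSplitOnMax_go_eq (l : List Char) : ∀ (fuel : Nat) (cur : List Char) (acc : List (List Char)),
    l.length < fuel →
    PySem.Chars.splitOnMax.go ['='] fuel 1 l cur acc =
      acc.reverse ++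
        (if l.any (fun c => c = '=') then
          [cur.reverse ++ l.takeWhile (fun c => c ≠ '='), (l.dropWhile (fun c => c ≠ '=')).tail]
        else [cur.reverse ++ l]) := by
  induction l with
  | nil =>
    intro fuel cur acc h
    cases fuel with
    | zero => omega
    | succ f => simp [PySem.Chars.splitOnMax.go]
  | cons c r ih =>
    intro fuel cur acc h
    cases fuel with
    | zero => omega
    | succ f =>
      by_cases hc : c = '='
      · subst hc
        rw [PySem.Chars.splitOnMax.go]
        rw [if_neg (by omega), if_pos (by simp [List.isPrefixOf])]
        simp only [List.length_cons, List.length_nil, List.drop_succ_cons, List.drop_zero,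
          Nat.zero_add]
        rw [pvGoMax_zero]
        simp [List.takeWhile, List.dropWhile]
      · rw [PySem.Chars.splitOnMax.go]
        rw [if_neg (by omega), if_neg (by simp [List.isPrefixOf]; exact fun hh => hc hh.symm)]
        rw [ih f (c :: cur) acc (by simp at h ⊢; omega)]
        simp [List.takeWhile, List.dropWhile, hc]

lemma pvSplitOnMax_eq (l : List Char) :
    PySem.Chars.splitOnMax l ['='] 1 =
      (if l.any (fun c => c = '=') then
        [l.takeWhile (fun c => c ≠ '='), (l.dropWhile (fun c => c ≠ '=')).tail]
      else [l]) := by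
  rw [PySem.Chars.splitOnMax]
  rw [if_neg (by omega)]
  rw [show (1 : Int).toNat = 1 from rfl]
  rw [pvSplitOnMax_go_eq l (l.length + 1) [] [] (by omega)]
  simp

-- a one-character needle is an infix exactly when the character occurs
lemma pvSingleton_infix_iff_mem (a : Char) (l : List Char) : [a] <:+: l ↔ a ∈ l := by
  constructor
  · rintro ⟨p, s, rfl⟩; simp
  · intro hm
    obtain ⟨p, s, rfl⟩ := List.append_of_mem hm
    exact ⟨p, s, by simp⟩

-- '=' in p  ↔  some character of p is '='
lemma pvIsIn_eq_any (p : List Char) : PySem.Chars.isIn ['='] p = p.any (fun c => c = '=') := by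
  by_cases h : '=' ∈ p
  · rw [List.any_eq_true.mpr ⟨'=', h, by simp⟩]
    exact (PySem.Chars.isIn_iff_infix _ _).mpr ((pvSingleton_infix_iff_mem _ _).mpr h)
  · have : p.any (fun c => c = '=') = false := by
      simp only [List.any_eq_false]
      intro x hx
      simp only [decide_eq_true_eq]
      exact fun he => h (he ▸ hx)
    rw [this]
    exact (PySem.Chars.isIn_eq_false_iff _ _).mpr
      (fun hin => h ((pvSingleton_infix_iff_mem _ _).mp hin))

-- A's per-part transform agrees with B's _fix on every part
lemma pvPart_eq_fix (p : List Char) : pvRedactPartA p = pvFixB p := by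
  unfold pvRedactPartA pvFixB
  rw [pvIsIn_eq_any]
  by_cases h : p.any (fun c => c = '=')
  · rw [if_pos h, pvSplitOnMax_eq, if_pos h]
    simp only [h, Bool.true_and]
    rw [show pvSensitiveB = pvSensitiveA from rfl]
  · rw [if_neg h]
    simp [h]

-- ''.join over a list of pieces is flatten
lemma pvJoin_nil (ls : List (List Char)) : PySem.Chars.join [] ls = ls.flatten := by
  induction ls with
  | nil => rfl
  | cons s ss ih =>
    cases ss with
    | nil => simp [PySem.Chars.join, List.intercalate]
    | cons t ts =>
      rw [PySem.Chars.join_cons_cons]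
      rw [PySem.Chars.join] at ih ⊢
      simp [List.flatten, ih]

-- '&'.join cons step
lemma pvJoin_amp_cons (s : List Char) (t : List Char) (ts : List (List Char)) :
    PySem.Chars.join ['&'] (s :: t :: ts) = s ++ '&' :: PySem.Chars.join ['&'] (t :: ts) := by
  rw [PySem.Chars.join_cons_cons]; simp

-- B's scan computes A's join-of-mapped-parts, with the pending segment generalized
lemma pvScan_eq (cs : List Char) : ∀ (out : List (List Char)) (seg : List Char),
    PySem.Chars.join [] ((cs.foldl pvStepB (out, seg)).1 ++ [pvFixB (cs.foldl pvStepB (out, seg)).2]) =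
      PySem.Chars.join [] out ++ PySem.Chars.join ['&'] ((pvConsHd seg (pvSplit cs)).map pvFixB) := by
  induction cs with
  | nil =>
    intro out seg
    simp [pvSplit, pvConsHd, pvJoin_nil, PySem.Chars.join_singleton]
  | cons c r ih =>
    intro out seg
    by_cases hc : c = '&'
    · subst hc
      simp only [List.foldl_cons]
      rw [show pvStepB (out, seg) '&' = (out ++ [pvFixB seg] ++ [['&']], []) from rfl]
      rw [ih (out ++ [pvFixB seg] ++ [['&']]) []]
      simp only [pvSplit, pvConsHd, pvJoin_nil]
      cases hps : pvSplit r with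
      | nil => exact absurd hps (pvSplit_ne_nil r)
      | cons s ss =>
        simp [pvJoin_amp_cons]
    · simp only [List.foldl_cons]
      rw [show pvStepB (out, seg) c = (out, seg ++ [c]) from if_neg hc]
      rw [ih out (seg ++ [c])]
      simp only [pvSplit, if_neg hc]
      cases hps : pvSplit r with
      | nil => exact absurd hps (pvSplit_ne_nil r)
      | cons s ss => simp [pvConsHd]

lemma pvToList_nil_iff (s : String) : s.toList = [] ↔ s = "" := by
  constructor
  · intro h
    have := congrArg String.ofList h
    simpa [String.ofList_toList] using this
  · intro h; simp [h]

-- ===== VERDICT (by name: the statement is the Claim_ definition above) =====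
theorem redact_query_string_py_spec : Claim_equal_redact_query_string_py := by
  intro qs _
  unfold Spec_redact_query_string_py redact_query_string_py redact_query_string_py_alt
  by_cases h : qs.toList = []
  · rw [if_pos h, h]
    simp only [List.foldl_nil]
    rw [pvJoin_nil]
    simp only [List.nil_append, List.flatten]
    have : pvFixB [] = [] := by rfl
    rw [this]
    exact ((pvToList_nil_iff qs).mp h).symm ▸ rfl
  · rw [if_neg h]
    simp only
    rw [pvSplitOn_eq, PySem.List.foldl_append_singleton_eq_map, List.nil_append]
    rw [pvScan_eq qs.toList [] []]
    have hmap : (pvSplit qs.toList).map pvRedactPartA = (pvSplit qs.toList).map pvFixB :=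
      List.map_congr_left (fun p _ => pvPart_eq_fix p)
    have hcons : pvConsHd [] (pvSplit qs.toList) = pvSplit qs.toList := by
      cases hps : pvSplit qs.toList with
      | nil => exact absurd hps (pvSplit_ne_nil qs.toList)
      | cons s ss => simp [pvConsHd]
    rw [hmap, hcons]
    rfl
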